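-- pv_equiv track=rewrite | github.com/posl/comment_recommendation | script/mod_gen/5_time/en/224_C/9.py | getNumOfTriangles
-- ===== SOURCE A (Python) =====
-- def getNumOfTriangles(points):
--     numOfTriangles = 0
--     for i in range(len(points)):
--         for j in range(i+1,len(points)):
--             for k in range(j+1,len(points)):
--                 if ((points[i][0] - points[j][0]) * (points[i][1] - points[k][1])) != ((points[i][0] - points[k][0]) * (points[i][1] - points[j][1])):
--                     numOfTriangles += 1
--     return numOfTriangles
-- ===== SOURCE B (Python) =====
-- def _gcd(a, b):
--     # Euclid on non-negative integers
--     while b: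
--         a, b = b, a % b
--     return a
--
--
-- def _collinear_pairs(p, rest):
--     # number of pairs (q, r) taken from rest (by position, q before r)
--     # that are collinear with the anchor p
--     xi, yi = p
--     zeros = 0
--     dirs = {}
--     for (x, y) in rest:
--         dx = x - xi
--         dy = y - yi
--         if dx == 0 and dy == 0:
--             zeros += 1
--         else:
--             if dx < 0 or (dx == 0 and dy < 0):
--                 dx = -dx
--                 dy = -dy
--             g = _gcd(dx, abs(dy))
--             key = (dx // g, dy // g)
--             dirs[key] = dirs.get(key, 0) + 1
--     m = len(rest)
--     res = zeros * (zeros - 1) // 2 + zeros * (m - zeros)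
--     for c in dirs.values():
--         res += c * (c - 1) // 2
--     return res
--
--
-- def getNumOfTriangles(points):
--     n = len(points)
--     collinear = 0
--     rest = points
--     while rest:
--         p = rest[0]
--         rest = rest[1:]
--         collinear += _collinear_pairs(p, rest)
--     return n * (n - 1) * (n - 2) // 6 - collinear
-- ===== Notes on version B (the rewrite author's own statement) =====
-- stated objective: faster
-- what changed: Replaces the O(n^3) scan of all triples by C(n,3) minus collinear triples, counted per anchor by grouping the later points into a dict keyed by their gcd-normalized direction from the anchor.
import Mathlib
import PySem

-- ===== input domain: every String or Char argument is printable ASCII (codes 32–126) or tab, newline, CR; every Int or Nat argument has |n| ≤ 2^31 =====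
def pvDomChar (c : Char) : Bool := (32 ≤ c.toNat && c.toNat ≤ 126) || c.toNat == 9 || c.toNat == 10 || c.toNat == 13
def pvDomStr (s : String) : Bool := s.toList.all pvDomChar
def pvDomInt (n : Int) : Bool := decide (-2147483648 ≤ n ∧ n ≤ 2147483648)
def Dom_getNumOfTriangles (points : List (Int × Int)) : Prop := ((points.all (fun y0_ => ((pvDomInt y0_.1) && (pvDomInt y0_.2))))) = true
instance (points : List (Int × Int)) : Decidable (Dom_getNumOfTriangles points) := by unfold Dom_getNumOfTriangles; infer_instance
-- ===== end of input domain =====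

-- B replaces A's O(n^3) scan of all triples by C(n,3) minus the number of collinear
-- triples, counted per anchor point by grouping later points on their gcd-normalized
-- direction from the anchor (objective: faster, asymptotically).

-- ===== PORT A =====
-- literal transliteration of A's triple loop over indices
def getNumOfTriangles (points : List (Int × Int)) : Int :=
  (PySem.List.pyRange 0 (PySem.List.len points) 1).foldl (fun acc i =>
    (PySem.List.pyRange (i + 1) (PySem.List.len points) 1).foldl (fun acc j =>
      (PySem.List.pyRange (j + 1) (PySem.List.len points) 1).foldl (fun acc k =>
        if ((PySem.List.pyGetD points i (0, 0)).1 - (PySem.List.pyGetD points j (0, 0)).1) *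
             ((PySem.List.pyGetD points i (0, 0)).2 - (PySem.List.pyGetD points k (0, 0)).2) ≠
           ((PySem.List.pyGetD points i (0, 0)).1 - (PySem.List.pyGetD points k (0, 0)).1) *
             ((PySem.List.pyGetD points i (0, 0)).2 - (PySem.List.pyGetD points j (0, 0)).2)
        then acc + 1 else acc) acc) acc) 0

-- ===== PORT B =====
-- B's hand-written Euclid on non-negative integers (while b: a, b = b, a % b);
-- arguments are non-negative in every call, so Nat with Nat.% is exact here.
def pyGcd (a b : Nat) : Nat :=
  if _h : b = 0 then a else pyGcd b (a % b)
termination_by b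
decreasing_by exact Nat.mod_lt _ (Nat.pos_of_ne_zero _h)

-- the normalized direction key B computes for a nonzero vector (dx, dy):
-- flip so dx > 0 or (dx = 0 and dy > 0), divide by gcd.  dx ≥ 0 after the flip, so
-- dx.toNat and dy.natAbs are Python's values of dx and abs(dy) exactly.
def dirKey (dx0 dy0 : Int) : Int × Int :=
  let dx : Int := if dx0 < 0 ∨ (dx0 = 0 ∧ dy0 < 0) then -dx0 else dx0
  let dy : Int := if dx0 < 0 ∨ (dx0 = 0 ∧ dy0 < 0) then -dy0 else dy0
  let g : Int := (pyGcd dx.toNat dy.natAbs : Nat)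
  (PySem.Int.floordiv dx g, PySem.Int.floordiv dy g)

-- B's helper _collinear_pairs(p, rest)
def collinearPairsB (p : Int × Int) (rest : List (Int × Int)) : Int :=
  let st : Int × PySem.Dict (Int × Int) Int :=
    rest.foldl (fun st q =>
      let dx := q.1 - p.1
      let dy := q.2 - p.2
      if dx = 0 ∧ dy = 0 then (st.1 + 1, st.2)
      else (st.1, st.2.modify (dirKey dx dy) 0 (· + 1))) (0, PySem.Dict.empty)
  let zeros := st.1
  let m : Int := PySem.List.len rest
  let res := PySem.Int.floordiv (zeros * (zeros - 1)) 2 + zeros * (m - zeros)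
  st.2.values.foldl (fun res c => res + PySem.Int.floordiv (c * (c - 1)) 2) res

-- B's while loop: p = rest[0]; rest = rest[1:]; collinear += _collinear_pairs(p, rest)
def suffLoop : Int → List (Int × Int) → Int
  | acc, [] => acc
  | acc, p :: rest => suffLoop (acc + collinearPairsB p rest) rest

def getNumOfTriangles_alt (points : List (Int × Int)) : Int :=
  let n : Int := PySem.List.len points
  PySem.Int.floordiv (n * (n - 1) * (n - 2)) 6 - suffLoop 0 points

-- ===== PRECONDITION & SPEC =====
def Spec_getNumOfTriangles (points : List (Int × Int)) (out : Int) : Prop := out = getNumOfTriangles_alt points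
instance (points : List (Int × Int)) (out : Int) : Decidable (Spec_getNumOfTriangles points out) := by unfold Spec_getNumOfTriangles; infer_instance

-- ===== CLAIM (what is proved, stated in full; the proofs are below) =====
def Claim_equal_getNumOfTriangles : Prop := ∀ (points : List (Int × Int)), Dom_getNumOfTriangles points → Spec_getNumOfTriangles points (getNumOfTriangles points)

-- ===== LEMMAS AND PROOFS =====

-- A's collinearity determinant
def crossD (p q r : Int × Int) : Int :=
  (p.1 - q.1) * (p.2 - r.2) - (p.1 - r.1) * (p.2 - q.2)

-- structural counterparts of A's loops
def rowNC (p q : Int × Int) : List (Int × Int) → Int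
  | [] => 0
  | r :: t => (if crossD p q r ≠ 0 then 1 else 0) + rowNC p q t

def rowC (p q : Int × Int) : List (Int × Int) → Int
  | [] => 0
  | r :: t => (if crossD p q r = 0 then 1 else 0) + rowC p q t

def ncPairs (p : Int × Int) : List (Int × Int) → Int
  | [] => 0
  | q :: t => rowNC p q t + ncPairs p t

def colPairs (p : Int × Int) : List (Int × Int) → Int
  | [] => 0
  | q :: t => rowC p q t + colPairs p t

def triples : List (Int × Int) → Int
  | [] => 0
  | p :: t => ncPairs p t + triples t

def suffSum : List (Int × Int) → Int
  | [] => 0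
  | p :: t => colPairs p t + suffSum t

-- B-side mathematical counterparts
def zCount (p : Int × Int) : List (Int × Int) → Int
  | [] => 0
  | q :: t => (if q.1 - p.1 = 0 ∧ q.2 - p.2 = 0 then 1 else 0) + zCount p t

def keyList (p : Int × Int) : List (Int × Int) → List (Int × Int)
  | [] => []
  | q :: t => if q.1 - p.1 = 0 ∧ q.2 - p.2 = 0 then keyList p t
              else dirKey (q.1 - p.1) (q.2 - p.2) :: keyList p t

def ch (c : Int) : Int := PySem.Int.floordiv (c * (c - 1)) 2

def sumKeys (L : List (Int × Int)) : Int :=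
  ((PySem.Set.ofList L).map (fun k => ch ((L.count k : Nat) : Int))).sum

-- ---- arithmetic helpers ----
theorem two_dvd_consec (m : Int) : 2 ∣ m * (m - 1) := by
  have h : ((m * (m - 1) : Int) : ZMod 2) = 0 := by
    have h2 : ∀ y : ZMod 2, y * (y - 1) = 0 := by decide
    push_cast
    exact h2 (m : ZMod 2)
  have := (ZMod.intCast_zmod_eq_zero_iff_dvd (m * (m - 1)) 2).mp h
  exact_mod_cast this

theorem six_dvd_consec (m : Int) : 6 ∣ m * (m - 1) * (m - 2) := by
  have h : ((m * (m - 1) * (m - 2) : Int) : ZMod 6) = 0 := by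
    have h6 : ∀ y : ZMod 6, y * (y - 1) * (y - 2) = 0 := by decide
    push_cast
    exact h6 (m : ZMod 6)
  have := (ZMod.intCast_zmod_eq_zero_iff_dvd (m * (m - 1) * (m - 2)) 6).mp h
  exact_mod_cast this

theorem ch_succ (c : Int) (_hc : 0 ≤ c) : ch (c + 1) = ch c + c := by
  unfold ch
  rw [PySem.Int.floordiv_eq_ediv_of_pos (by norm_num),
     PySem.Int.floordiv_eq_ediv_of_pos (by norm_num)]
  obtain ⟨k, hk⟩ := two_dvd_consec c
  have e1 : (c + 1) * (c + 1 - 1) = 2 * k + 2 * c := by linear_combination hk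
  rw [e1, hk]
  omega

theorem ch_one : ch 1 = 0 := by
  unfold ch
  rw [PySem.Int.floordiv_eq_ediv_of_pos (by norm_num)]
  norm_num

theorem zCount_nonneg (p : Int × Int) (t : List (Int × Int)) : 0 ≤ zCount p t := by
  induction t with
  | nil => simp [zCount]
  | cons q t ih => unfold zCount; split <;> omega

-- ---- gcd / direction-key lemmas ----
theorem pyGcd_eq (a b : Nat) : pyGcd a b = Nat.gcd a b := by
  induction a, b using pyGcd.induct with
  | case1 a => unfold pyGcd; simp
  | case2 a b hb ih =>
    unfold pyGcd
    simp only [hb, dite_eq_ite, if_false]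
    rw [ih]
    rw [Nat.gcd_comm b (a % b), ← Nat.gcd_rec b a, Nat.gcd_comm]

def canon (u : Int × Int) : Int × Int :=
  if u.1 < 0 ∨ (u.1 = 0 ∧ u.2 < 0) then (-u.1, -u.2) else u

def nkey (w : Int × Int) : Int × Int :=
  (w.1 / (Int.gcd w.1 w.2 : Int), w.2 / (Int.gcd w.1 w.2 : Int))

theorem canon_fst_nonneg (u : Int × Int) : 0 ≤ (canon u).1 := by
  unfold canon
  split
  · rename_i h; rcases h with h | ⟨h, _⟩ <;> simp <;> omega
  · rename_i h; push_neg at h; omega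

theorem canon_ne (u : Int × Int) (hu : ¬(u.1 = 0 ∧ u.2 = 0)) :
    ¬((canon u).1 = 0 ∧ (canon u).2 = 0) := by
  unfold canon
  split <;> simp <;> omega

theorem canon_snd_pos (u : Int × Int) (hu : ¬(u.1 = 0 ∧ u.2 = 0))
    (h1 : (canon u).1 = 0) : 0 < (canon u).2 := by
  unfold canon at h1 ⊢
  split_ifs at h1 ⊢ with h
  · simp only [] at h1 ⊢
    obtain h | ⟨ha, hb⟩ := h <;> omega
  · rw [not_or, not_and_or] at h
    omega

theorem cross_canon (u v : Int × Int) :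
    ((canon u).1 * (canon v).2 - (canon u).2 * (canon v).1 = 0) ↔
      (u.1 * v.2 - u.2 * v.1 = 0) := by
  unfold canon
  split_ifs <;> simp <;> constructor <;> intro h <;> ring_nf at h ⊢ <;> linarith

theorem gcd_pos (w : Int × Int) (hw : ¬(w.1 = 0 ∧ w.2 = 0)) :
    0 < (Int.gcd w.1 w.2 : Int) := by
  have h : Int.gcd w.1 w.2 ≠ 0 := by
    intro h
    rw [Int.gcd_eq_zero_iff] at h
    exact hw h
  exact_mod_cast Nat.pos_of_ne_zero h

theorem dirKey_eq_nkey (u : Int × Int) (hu : ¬(u.1 = 0 ∧ u.2 = 0)) :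
    dirKey u.1 u.2 = nkey (canon u) := by
  unfold dirKey nkey canon
  split_ifs with h
  · have hg : 0 < ((Int.gcd (-u.1) (-u.2) : Nat) : Int) :=
      gcd_pos (-u.1, -u.2) (by simp only []; omega)
    show (PySem.Int.floordiv (-u.1) ((pyGcd (-u.1).toNat (-u.2).natAbs : Nat) : Int),
          PySem.Int.floordiv (-u.2) ((pyGcd (-u.1).toNat (-u.2).natAbs : Nat) : Int)) = _
    rw [pyGcd_eq]
    have h1 : (-u.1).toNat = (-u.1).natAbs := by omega
    rw [h1]
    have h2 : ((Nat.gcd (-u.1).natAbs (-u.2).natAbs : Nat) : Int) =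
        ((Int.gcd (-u.1) (-u.2) : Nat) : Int) := rfl
    rw [h2, PySem.Int.floordiv_eq_ediv_of_pos hg, PySem.Int.floordiv_eq_ediv_of_pos hg]
  · have hg : 0 < ((Int.gcd u.1 u.2 : Nat) : Int) := gcd_pos (u.1, u.2) (by simpa using hu)
    show (PySem.Int.floordiv u.1 ((pyGcd u.1.toNat u.2.natAbs : Nat) : Int),
          PySem.Int.floordiv u.2 ((pyGcd u.1.toNat u.2.natAbs : Nat) : Int)) = _
    rw [pyGcd_eq]
    have h1 : u.1.toNat = u.1.natAbs := by rw [not_or, not_and_or] at h; omega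
    rw [h1]
    have h2 : ((Nat.gcd u.1.natAbs u.2.natAbs : Nat) : Int) =
        ((Int.gcd u.1 u.2 : Nat) : Int) := rfl
    rw [h2, PySem.Int.floordiv_eq_ediv_of_pos hg, PySem.Int.floordiv_eq_ediv_of_pos hg]

theorem nkey_decomp_fst (w : Int × Int) :
    (Int.gcd w.1 w.2 : Int) * (nkey w).1 = w.1 ∧
    (Int.gcd w.1 w.2 : Int) * (nkey w).2 = w.2 := by
  unfold nkey
  exact ⟨Int.mul_ediv_cancel' (Int.gcd_dvd_left ..),
         Int.mul_ediv_cancel' (Int.gcd_dvd_right ..)⟩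

theorem prim_eq (p q : Int × Int)
    (hp1 : 0 ≤ p.1) (hq1 : 0 ≤ q.1)
    (hp0 : p.1 = 0 → 0 < p.2) (hq0 : q.1 = 0 → 0 < q.2)
    (hpg : Int.gcd p.1 p.2 = 1) (hqg : Int.gcd q.1 q.2 = 1)
    (hx : p.1 * q.2 - p.2 * q.1 = 0) : p = q := by
  have hcp : IsCoprime p.1 p.2 := Int.isCoprime_iff_gcd_eq_one.mpr hpg
  have hcq : IsCoprime q.1 q.2 := Int.isCoprime_iff_gcd_eq_one.mpr hqg
  have hx' : p.1 * q.2 = p.2 * q.1 := by omega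
  have hd1 : p.1 ∣ q.1 := by
    have h : p.1 ∣ q.1 * p.2 := ⟨q.2, by linarith [hx']⟩
    exact hcp.dvd_of_dvd_mul_right h
  have hd2 : q.1 ∣ p.1 := by
    have h : q.1 ∣ p.1 * q.2 := ⟨p.2, by linarith [hx']⟩
    exact hcq.dvd_of_dvd_mul_right h
  have h11 : p.1 = q.1 := Int.dvd_antisymm hp1 hq1 hd1 hd2
  by_cases h0 : p.1 = 0
  · have hq10 : q.1 = 0 := by omega
    have hp2 : p.2.natAbs = 1 := by
      have : Int.gcd 0 p.2 = 1 := h0 ▸ hpg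
      simpa [Int.gcd] using this
    have hq2 : q.2.natAbs = 1 := by
      have : Int.gcd 0 q.2 = 1 := hq10 ▸ hqg
      simpa [Int.gcd] using this
    have hp2' : p.2 = 1 := by have := hp0 h0; omega
    have hq2' : q.2 = 1 := by have := hq0 hq10; omega
    exact Prod.ext h11 (hp2'.trans hq2'.symm)
  · have h22 : p.2 = q.2 := by
      have hc : p.1 * q.2 = p.1 * p.2 := by linear_combination hx' - p.2 * h11
      have := mul_left_cancel₀ h0 hc
      omega
    exact Prod.ext h11 h22

theorem nkey_props (w : Int × Int) (hw : ¬(w.1 = 0 ∧ w.2 = 0))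
    (h1 : 0 ≤ w.1) (h2 : w.1 = 0 → 0 < w.2) :
    0 ≤ (nkey w).1 ∧ ((nkey w).1 = 0 → 0 < (nkey w).2) ∧
      Int.gcd (nkey w).1 (nkey w).2 = 1 := by
  have hg := gcd_pos w hw
  obtain ⟨e1, e2⟩ := nkey_decomp_fst w
  have hgpos : 0 < Int.gcd w.1 w.2 := by exact_mod_cast hg
  refine ⟨Int.ediv_nonneg h1 (by positivity), ?_, Int.gcd_div_gcd_div_gcd hgpos⟩
  intro hz
  have hw1 : w.1 = 0 := by rw [← e1, hz]; ring
  have hw2 : 0 < w.2 := h2 hw1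
  rcases lt_trichotomy (nkey w).2 0 with hlt | heq | hgt
  · have : (Int.gcd w.1 w.2 : Int) * (nkey w).2 < 0 := mul_neg_of_pos_of_neg hg hlt
    omega
  · rw [heq] at e2; simp at e2; omega
  · exact hgt

theorem dirKey_eq_iff (u v : Int × Int)
    (hu : ¬(u.1 = 0 ∧ u.2 = 0)) (hv : ¬(v.1 = 0 ∧ v.2 = 0)) :
    dirKey u.1 u.2 = dirKey v.1 v.2 ↔ u.1 * v.2 - u.2 * v.1 = 0 := by
  rw [dirKey_eq_nkey u hu, dirKey_eq_nkey v hv, ← cross_canon u v]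
  have hcu := canon_ne u hu
  have hcv := canon_ne v hv
  obtain ⟨eu1, eu2⟩ := nkey_decomp_fst (canon u)
  obtain ⟨ev1, ev2⟩ := nkey_decomp_fst (canon v)
  have hgu := gcd_pos (canon u) hcu
  have hgv := gcd_pos (canon v) hcv
  obtain ⟨pu1, pu2, pu3⟩ := nkey_props (canon u) hcu (canon_fst_nonneg u) (canon_snd_pos u hu)
  obtain ⟨pv1, pv2, pv3⟩ := nkey_props (canon v) hcv (canon_fst_nonneg v) (canon_snd_pos v hv)
  constructor
  · intro h
    have h1 : (nkey (canon u)).1 = (nkey (canon v)).1 := by rw [h]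
    have h2 : (nkey (canon u)).2 = (nkey (canon v)).2 := by rw [h]
    calc (canon u).1 * (canon v).2 - (canon u).2 * (canon v).1
        = ((Int.gcd (canon u).1 (canon u).2 : Int) * (nkey (canon u)).1) *
          ((Int.gcd (canon v).1 (canon v).2 : Int) * (nkey (canon v)).2) -
          ((Int.gcd (canon u).1 (canon u).2 : Int) * (nkey (canon u)).2) *
          ((Int.gcd (canon v).1 (canon v).2 : Int) * (nkey (canon v)).1) := by
          rw [eu1, eu2, ev1, ev2]
      _ = 0 := by rw [h1, h2]; ring
  · intro h
    apply prim_eq _ _ pu1 pv1 pu2 pv2 pu3 pv3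
    have e : (Int.gcd (canon u).1 (canon u).2 : Int) * (Int.gcd (canon v).1 (canon v).2 : Int) *
        ((nkey (canon u)).1 * (nkey (canon v)).2 - (nkey (canon u)).2 * (nkey (canon v)).1) =
        ((Int.gcd (canon u).1 (canon u).2 : Int) * (nkey (canon u)).1) *
        ((Int.gcd (canon v).1 (canon v).2 : Int) * (nkey (canon v)).2) -
        ((Int.gcd (canon u).1 (canon u).2 : Int) * (nkey (canon u)).2) *
        ((Int.gcd (canon v).1 (canon v).2 : Int) * (nkey (canon v)).1) := by ring
    have hexp : (Int.gcd (canon u).1 (canon u).2 : Int) * (Int.gcd (canon v).1 (canon v).2 : Int) *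
        ((nkey (canon u)).1 * (nkey (canon v)).2 - (nkey (canon u)).2 * (nkey (canon v)).1) = 0 := by
      rw [e, eu1, eu2, ev1, ev2]; exact h
    have hne : (Int.gcd (canon u).1 (canon u).2 : Int) * (Int.gcd (canon v).1 (canon v).2 : Int) ≠ 0 :=
      ne_of_gt (mul_pos hgu hgv)
    exact (mul_eq_zero.mp hexp).resolve_left hne

-- ---- sumKeys lemmas ----
theorem sumKeys_eq_finset (L : List (Int × Int)) :
    sumKeys L = ∑ k ∈ L.toFinset, ch ((L.count k : Nat) : Int) := by
  unfold sumKeys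
  rw [← List.sum_toFinset _ (PySem.Set.nodup_ofList L)]
  have hset : (PySem.Set.ofList L).toFinset = L.toFinset := by
    ext k; simp [PySem.Set.mem_ofList]
  rw [hset]

theorem sumKeys_cons (x : Int × Int) (L : List (Int × Int)) :
    sumKeys (x :: L) = sumKeys L + ((L.count x : Nat) : Int) := by
  rw [sumKeys_eq_finset, sumKeys_eq_finset]
  by_cases hx : x ∈ L
  · have hxT : x ∈ L.toFinset := List.mem_toFinset.mpr hx
    have hT : (x :: L).toFinset = L.toFinset := by
      rw [List.toFinset_cons, Finset.insert_eq_self.mpr hxT]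
    rw [hT, ← Finset.sum_erase_add _ _ hxT, ← Finset.sum_erase_add L.toFinset _ hxT]
    have hcong : ∑ k ∈ L.toFinset.erase x, ch (((x :: L).count k : Nat) : Int) =
        ∑ k ∈ L.toFinset.erase x, ch ((L.count k : Nat) : Int) :=
      Finset.sum_congr rfl (fun k hk => by
        have hne : x ≠ k := Ne.symm (Finset.ne_of_mem_erase hk)
        simp [List.count_cons, hne])
    rw [hcong]
    have hfx : ch (((x :: L).count x : Nat) : Int) =
        ch ((L.count x : Nat) : Int) + ((L.count x : Nat) : Int) := by
      have hcc : (x :: L).count x = L.count x + 1 := by simp [List.count_cons]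
      rw [hcc]; push_cast; exact ch_succ _ (by positivity)
    rw [hfx]; ring
  · have hxT : x ∉ L.toFinset := fun h => hx (List.mem_toFinset.mp h)
    rw [List.toFinset_cons, Finset.sum_insert hxT]
    have h0 : L.count x = 0 := List.count_eq_zero.mpr hx
    have hfx : ch (((x :: L).count x : Nat) : Int) = 0 := by
      have hcc : (x :: L).count x = 1 := by simp [List.count_cons, h0]
      rw [hcc]; simpa using ch_one
    have hcong : ∑ k ∈ L.toFinset, ch (((x :: L).count k : Nat) : Int) =
        ∑ k ∈ L.toFinset, ch ((L.count k : Nat) : Int) :=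
      Finset.sum_congr rfl (fun k hk => by
        have hne : x ≠ k := fun he => hx (he ▸ List.mem_toFinset.mp hk)
        simp [List.count_cons, hne])
    rw [hfx, hcong, h0]
    simp

-- ---- per-row lemmas ----
theorem rowC_self (p q : Int × Int) (hq : q.1 - p.1 = 0 ∧ q.2 - p.2 = 0)
    (t : List (Int × Int)) : rowC p q t = (t.length : Int) := by
  induction t with
  | nil => simp [rowC]
  | cons r t ih =>
    have hc : crossD p q r = 0 := by
      unfold crossD; linear_combination (-(p.2 - r.2)) * hq.1 + (p.1 - r.1) * hq.2
    unfold rowC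
    rw [if_pos hc, ih]
    push_cast [List.length_cons]
    ring

theorem rowC_split (p q : Int × Int) (hq : ¬(q.1 - p.1 = 0 ∧ q.2 - p.2 = 0))
    (t : List (Int × Int)) :
    rowC p q t = zCount p t +
      (((keyList p t).count (dirKey (q.1 - p.1) (q.2 - p.2)) : Nat) : Int) := by
  induction t with
  | nil => simp [rowC, zCount, keyList]
  | cons r t ih =>
    unfold rowC zCount keyList
    by_cases hr : r.1 - p.1 = 0 ∧ r.2 - p.2 = 0
    · have hc : crossD p q r = 0 := by
        unfold crossD; linear_combination (p.2 - q.2) * hr.1 + (-(p.1 - q.1)) * hr.2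
      rw [if_pos hc, if_pos hr, if_pos hr, ih]
      ring
    · have hiff : crossD p q r = 0 ↔
          dirKey (r.1 - p.1) (r.2 - p.2) = dirKey (q.1 - p.1) (q.2 - p.2) := by
        have hk := dirKey_eq_iff (r.1 - p.1, r.2 - p.2) (q.1 - p.1, q.2 - p.2)
          (by simpa using hr) (by simpa using hq)
        simp only [] at hk
        constructor
        · intro h; apply hk.mpr; unfold crossD at h; linear_combination -h
        · intro h; have hx := hk.mp h; unfold crossD; linear_combination -hx
      rw [if_neg hr, if_neg hr, ih]
      by_cases hc : crossD p q r = 0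
      · have hkq : dirKey (q.1 - p.1) (q.2 - p.2) = dirKey (r.1 - p.1) (r.2 - p.2) :=
          (hiff.mp hc).symm
        rw [if_pos hc]
        simp [hkq.symm]
        omega
      · have hkq : dirKey (q.1 - p.1) (q.2 - p.2) ≠ dirKey (r.1 - p.1) (r.2 - p.2) :=
          fun he => hc (hiff.mpr he.symm)
        rw [if_neg hc]
        simp [Ne.symm hkq]

theorem rowNC_add_rowC (p q : Int × Int) (t : List (Int × Int)) :
    rowNC p q t + rowC p q t = (t.length : Int) := by
  induction t with
  | nil => simp [rowNC, rowC]
  | cons r t ih =>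
    unfold rowNC rowC
    by_cases h : crossD p q r = 0 <;> simp only [h, if_true, if_false, ne_eq,
      not_true_eq_false, not_false_eq_true] <;> push_cast [List.length_cons] <;> omega

-- ---- the per-anchor identity ----
theorem colPairs_eq (p : Int × Int) (t : List (Int × Int)) :
    colPairs p t = ch (zCount p t) + zCount p t * ((t.length : Int) - zCount p t) +
      sumKeys (keyList p t) := by
  induction t with
  | nil =>
    simp [colPairs, zCount, keyList]
    rw [show ch 0 = 0 from by decide, show sumKeys [] = 0 from by decide]
    ring
  | cons q t ih =>
    unfold colPairs zCount keyList
    by_cases hq : q.1 - p.1 = 0 ∧ q.2 - p.2 = 0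
    · rw [if_pos hq, if_pos hq, rowC_self p q hq, ih]
      push_cast [List.length_cons]
      rw [add_comm (1 : Int) (zCount p t), ch_succ _ (zCount_nonneg p t)]
      ring
    · rw [if_neg hq, if_neg hq, rowC_split p q hq, ih, sumKeys_cons]
      push_cast [List.length_cons]
      ring

theorem pairs_tot (p : Int × Int) (t : List (Int × Int)) :
    ncPairs p t + colPairs p t = ((t.length : Int) * ((t.length : Int) - 1)) / 2 := by
  induction t with
  | nil => simp [ncPairs, colPairs]
  | cons q t ih =>
    unfold ncPairs colPairs
    have hr := rowNC_add_rowC p q t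
    obtain ⟨k, hk⟩ := two_dvd_consec ((t.length : Int))
    push_cast [List.length_cons]
    have e2 : ((t.length : Int) + 1) * ((t.length : Int) + 1 - 1) = 2 * k + 2 * (t.length : Int) := by
      linear_combination hk
    rw [e2]
    rw [hk] at ih
    omega

theorem tot (t : List (Int × Int)) :
    triples t + suffSum t =
      ((t.length : Int) * ((t.length : Int) - 1) * ((t.length : Int) - 2)) / 6 := by
  induction t with
  | nil => simp [triples, suffSum]
  | cons p t ih =>
    unfold triples suffSum
    have hp := pairs_tot p t
    obtain ⟨k, hk⟩ := two_dvd_consec ((t.length : Int))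
    obtain ⟨j, hj⟩ := six_dvd_consec ((t.length : Int))
    push_cast [List.length_cons]
    have e : ((t.length : Int) + 1) * ((t.length : Int) + 1 - 1) * ((t.length : Int) + 1 - 2) =
        6 * j + 6 * k := by linear_combination hj + 3 * hk
    rw [e]
    rw [hk] at hp
    rw [hj] at ih
    omega

-- ---- bridging A's port to the structural loops ----
theorem foldl_row (p q : Int × Int) (t : List (Int × Int)) (acc : Int) :
    t.foldl (fun acc r =>
        if (p.1 - q.1) * (p.2 - r.2) ≠ (p.1 - r.1) * (p.2 - q.2) then acc + 1 else acc)
      acc = acc + rowNC p q t := by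
  induction t generalizing acc with
  | nil => simp [rowNC]
  | cons r t ih =>
    rw [List.foldl_cons, ih]
    simp only [rowNC]
    by_cases h : crossD p q r = 0
    · have h' : (p.1 - q.1) * (p.2 - r.2) = (p.1 - r.1) * (p.2 - q.2) := by
        unfold crossD at h; omega
      simp [h', h]
    · have h' : (p.1 - q.1) * (p.2 - r.2) ≠ (p.1 - r.1) * (p.2 - q.2) := by
        unfold crossD at h; omega
      simp [h', h]
      try omega

theorem midA (points : List (Int × Int)) (p : Int × Int) :
    ∀ (fuel : Nat) (a acc : Int), 0 ≤ a → points.length - a.toNat = fuel →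
    (PySem.List.pyRange a ((points.length : Nat) : Int) 1).foldl (fun acc j =>
      (PySem.List.pyRange (j + 1) ((points.length : Nat) : Int) 1).foldl (fun acc k =>
        if (p.1 - (PySem.List.pyGetD points j (0, 0)).1) *
             (p.2 - (PySem.List.pyGetD points k (0, 0)).2) ≠
           (p.1 - (PySem.List.pyGetD points k (0, 0)).1) *
             (p.2 - (PySem.List.pyGetD points j (0, 0)).2)
        then acc + 1 else acc) acc) acc
      = acc + ncPairs p (points.drop a.toNat) := by
  intro fuel
  induction fuel with
  | zero =>
    intro a acc ha hf
    have hle : ((points.length : Nat) : Int) ≤ a := by omega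
    rw [PySem.List.pyRange_one_eq_nil hle, List.foldl_nil]
    have hd : points.drop a.toNat = [] := List.drop_eq_nil_of_le (by omega)
    rw [hd]
    simp [ncPairs]
  | succ n ihf =>
    intro a acc ha hf
    have hlt : a < ((points.length : Nat) : Int) := by omega
    rw [PySem.List.pyRange_one_cons hlt, List.foldl_cons]
    rw [PySem.List.foldl_pyRange_pyGetD' points (0, 0)
      (fun acc r =>
        if (p.1 - (PySem.List.pyGetD points a (0, 0)).1) * (p.2 - r.2) ≠
           (p.1 - r.1) * (p.2 - (PySem.List.pyGetD points a (0, 0)).2)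
        then acc + 1 else acc) acc (show (0 : Int) ≤ a + 1 by omega)]
    rw [foldl_row p (PySem.List.pyGetD points a (0, 0))]
    rw [ihf (a + 1) _ (by omega) (by omega)]
    have hget : PySem.List.pyGetD points a (0, 0) = points[a.toNat] :=
      PySem.List.pyGetD_eq_getElem points (0, 0) ha (by omega)
    have htn : (a + 1).toNat = a.toNat + 1 := by omega
    have hdrop : points.drop a.toNat = points[a.toNat] :: points.drop (a.toNat + 1) :=
      List.drop_eq_getElem_cons (by omega)
    rw [htn, hdrop, hget]
    simp only [ncPairs]
    ring

theorem outA (points : List (Int × Int)) :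
    ∀ (fuel : Nat) (a acc : Int), 0 ≤ a → points.length - a.toNat = fuel →
    (PySem.List.pyRange a ((points.length : Nat) : Int) 1).foldl (fun acc i =>
      (PySem.List.pyRange (i + 1) ((points.length : Nat) : Int) 1).foldl (fun acc j =>
        (PySem.List.pyRange (j + 1) ((points.length : Nat) : Int) 1).foldl (fun acc k =>
          if ((PySem.List.pyGetD points i (0, 0)).1 - (PySem.List.pyGetD points j (0, 0)).1) *
               ((PySem.List.pyGetD points i (0, 0)).2 - (PySem.List.pyGetD points k (0, 0)).2) ≠
             ((PySem.List.pyGetD points i (0, 0)).1 - (PySem.List.pyGetD points k (0, 0)).1) *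
               ((PySem.List.pyGetD points i (0, 0)).2 - (PySem.List.pyGetD points j (0, 0)).2)
          then acc + 1 else acc) acc) acc) acc
      = acc + triples (points.drop a.toNat) := by
  intro fuel
  induction fuel with
  | zero =>
    intro a acc ha hf
    have hle : ((points.length : Nat) : Int) ≤ a := by omega
    rw [PySem.List.pyRange_one_eq_nil hle, List.foldl_nil]
    have hd : points.drop a.toNat = [] := List.drop_eq_nil_of_le (by omega)
    rw [hd]
    simp [triples]
  | succ n ihf =>
    intro a acc ha hf
    have hlt : a < ((points.length : Nat) : Int) := by omega
    rw [PySem.List.pyRange_one_cons hlt, List.foldl_cons]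
    rw [midA points (PySem.List.pyGetD points a (0, 0)) (points.length - (a + 1).toNat)
      (a + 1) acc (by omega) (by omega)]
    rw [ihf (a + 1) _ (by omega) (by omega)]
    have hget : PySem.List.pyGetD points a (0, 0) = points[a.toNat] :=
      PySem.List.pyGetD_eq_getElem points (0, 0) ha (by omega)
    have htn : (a + 1).toNat = a.toNat + 1 := by omega
    have hdrop : points.drop a.toNat = points[a.toNat] :: points.drop (a.toNat + 1) :=
      List.drop_eq_getElem_cons (by omega)
    rw [htn, hdrop, hget]
    simp only [triples]
    ring

theorem portA_eq (points : List (Int × Int)) : getNumOfTriangles points = triples points := by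
  unfold getNumOfTriangles
  simp only [PySem.List.len]
  rw [outA points points.length 0 0 (by omega) (by simp)]
  simp

theorem foldl_state (p : Int × Int) (rest : List (Int × Int)) :
    ∀ (z : Int) (d : PySem.Dict (Int × Int) Int),
    rest.foldl (fun st q =>
      let dx := q.1 - p.1
      let dy := q.2 - p.2
      if dx = 0 ∧ dy = 0 then (st.1 + 1, st.2)
      else (st.1, st.2.modify (dirKey dx dy) 0 (· + 1))) (z, d)
    = (z + zCount p rest,
       (keyList p rest).foldl (fun d k => d.modify k 0 (· + 1)) d) := by
  induction rest with
  | nil => intro z d; simp [zCount, keyList]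
  | cons q rest ih =>
    intro z d
    rw [List.foldl_cons]
    rw [show ((let dx := q.1 - p.1; let dy := q.2 - p.2;
          if dx = 0 ∧ dy = 0 then ((z, d).1 + 1, (z, d).2)
          else ((z, d).1, (z, d).2.modify (dirKey dx dy) 0 fun x => x + 1)) :
            Int × PySem.Dict (Int × Int) Int)
        = if q.1 - p.1 = 0 ∧ q.2 - p.2 = 0 then (z + 1, d)
          else (z, d.modify (dirKey (q.1 - p.1) (q.2 - p.2)) 0 fun x => x + 1) from rfl]
    by_cases hq : q.1 - p.1 = 0 ∧ q.2 - p.2 = 0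
    · rw [if_pos hq, ih (z + 1) d]
      have h1 : zCount p (q :: rest) = 1 + zCount p rest := by
        simp only [zCount]; rw [if_pos hq]
      have h2 : keyList p (q :: rest) = keyList p rest := by
        simp only [keyList]; rw [if_pos hq]
      rw [h1, h2, Prod.ext_iff]
      exact ⟨by ring, rfl⟩
    · rw [if_neg hq, ih z (d.modify (dirKey (q.1 - p.1) (q.2 - p.2)) 0 (· + 1))]
      have h1 : zCount p (q :: rest) = 0 + zCount p rest := by
        simp only [zCount]; rw [if_neg hq]
      have h2 : keyList p (q :: rest) =
          dirKey (q.1 - p.1) (q.2 - p.2) :: keyList p rest := by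
        simp only [keyList]; rw [if_neg hq]
      rw [h1, h2, Prod.ext_iff]
      exact ⟨by ring, by rw [List.foldl_cons]⟩

theorem collinearPairsB_eq (p : Int × Int) (rest : List (Int × Int)) :
    collinearPairsB p rest = colPairs p rest := by
  rw [show collinearPairsB p rest =
      (fun st : Int × PySem.Dict (Int × Int) Int =>
        st.2.values.foldl (fun res c => res + PySem.Int.floordiv (c * (c - 1)) 2)
          (PySem.Int.floordiv (st.1 * (st.1 - 1)) 2 +
            st.1 * (PySem.List.len rest - st.1)))
      (rest.foldl (fun st q =>
        let dx := q.1 - p.1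
        let dy := q.2 - p.2
        if dx = 0 ∧ dy = 0 then (st.1 + 1, st.2)
        else (st.1, st.2.modify (dirKey dx dy) 0 (· + 1))) (0, PySem.Dict.empty)) from rfl]
  rw [foldl_state p rest 0 PySem.Dict.empty, ← PySem.Dict.counter_eq_foldl]
  have hval : (PySem.Dict.counter (keyList p rest)).values =
      (PySem.Set.ofList (keyList p rest)).map
        (fun k => (((keyList p rest).count k : Nat) : Int)) := by
    rw [PySem.Dict.values_eq_map_keys _ (PySem.Dict.nodup_keys_counter _) 0,
        PySem.Dict.keys_counter]
    exact List.map_congr_left (fun k _ => PySem.Dict.getD_counter _ k)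
  rw [show (fun st : Int × PySem.Dict (Int × Int) Int =>
        st.2.values.foldl (fun res c => res + PySem.Int.floordiv (c * (c - 1)) 2)
          (PySem.Int.floordiv (st.1 * (st.1 - 1)) 2 +
            st.1 * (PySem.List.len rest - st.1)))
      (0 + zCount p rest, PySem.Dict.counter (keyList p rest))
    = (PySem.Dict.counter (keyList p rest)).values.foldl
        (fun res c => res + PySem.Int.floordiv (c * (c - 1)) 2)
        (PySem.Int.floordiv ((0 + zCount p rest) * ((0 + zCount p rest) - 1)) 2 +
          (0 + zCount p rest) * (PySem.List.len rest - (0 + zCount p rest))) from rfl]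
  rw [hval, PySem.List.foldl_add]
  rw [List.map_map]
  rw [show ((fun c => PySem.Int.floordiv (c * (c - 1)) 2) ∘
        fun k => ((List.count k (keyList p rest) : Nat) : Int))
      = fun k => PySem.Int.floordiv ((((List.count k (keyList p rest) : Nat)) : Int) *
          ((((List.count k (keyList p rest) : Nat)) : Int) - 1)) 2 from rfl]
  rw [colPairs_eq p rest]
  have hlen : PySem.List.len rest = (rest.length : Int) := rfl
  try rw [hlen]
  unfold sumKeys ch
  ring

theorem suffLoop_eq (t : List (Int × Int)) : ∀ acc : Int, suffLoop acc t = acc + suffSum t := by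
  induction t with
  | nil => intro acc; simp [suffLoop, suffSum]
  | cons p t ih =>
    intro acc
    unfold suffLoop suffSum
    rw [ih, collinearPairsB_eq]
    ring

-- ===== VERDICT (by name: the statement is the Claim_ definition above) =====
theorem getNumOfTriangles_spec : Claim_equal_getNumOfTriangles := by
  intro points _
  unfold Spec_getNumOfTriangles getNumOfTriangles_alt
  have hA := portA_eq points
  have hT := tot points
  have hS := suffLoop_eq points 0
  rw [hA]
  simp only [PySem.List.len]
  rw [PySem.Int.floordiv_eq_ediv_of_pos (by norm_num)]
  omega
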